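-- pv_equiv track=rewrite | github.com/ThomasDeb/AdventOfCode | 2024/advent21.py | numeric_to_directional
-- ===== SOURCE A (Python) =====
-- def row_col_numeric_keypad(key):
--     col0, col1, col2 = "x147", "0258", "A369"
--     if key in col0:
--         return col0.index(key), 0
--     elif key in col1:
--         return col1.index(key), 1
--     elif key in col2:
--         return col2.index(key), 2
--
-- def keypad_numeric(current_key, target_key):
--     keys = [""]
--     row_current, col_current = row_col_numeric_keypad(current_key)
--     row_target, col_target = row_col_numeric_keypad(target_key)
--     if col_current < col_target:
--         keys[0] += ">" * (col_target - col_current)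
--     elif col_current > col_target and not (col_target == 0 and row_current == 0):
--         keys[0] += "<" * (col_current - col_target)
--     if row_current < row_target:
--         if keys[0] != "":
--             keys.append("^" * (row_target - row_current) + keys[0])
--         keys[0] += "^" * (row_target - row_current)
--     elif row_current > row_target:
--         if keys[0] != "" and not (col_current == 0 and row_target == 0):
--             keys.append("v" * (row_current - row_target) + keys[0])
--         keys[0] += "v" * (row_current - row_target)
--     if col_current > col_target and (col_target == 0 and row_current == 0):
--         keys[0] += "<" * (col_current - col_target)
--     return keys
--
-- def numeric_to_directional(code):
--     prev_key = "A"
--     sequences = [""]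
--     for key in code:
--         next_sequences = []
--         for seq in sequences:
--             for s in keypad_numeric(prev_key, key):
--                 next_sequences.append(seq + s + "A")
--         prev_key = key
--         sequences = next_sequences
--     len_seq = min([len(s) for s in sequences])
--     sequences = [s for s in sequences if len(s) == len_seq]
--     return sequences
-- ===== SOURCE B (Python) =====
-- # B: direct (row, col) position table + explicit case analysis producing the one or two
-- # candidate move strings, combined by recursion over the code (instead of A's string-index
-- # column lookup, mutation-based keys list, and rebuild-the-list-at-every-key loop).
--
-- POS = {'7': (0, 0), '8': (0, 1), '9': (0, 2),
--        '4': (1, 0), '5': (1, 1), '6': (1, 2),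
--        '1': (2, 0), '2': (2, 1), '3': (2, 2),
--        'x': (3, 0), '0': (3, 1), 'A': (3, 2)}
--
-- def _moves(cur, tgt):
--     r1, c1 = POS[cur]
--     r2, c2 = POS[tgt]
--     h = ('>' if c2 > c1 else '<') * abs(c2 - c1)
--     v = ('^' if r2 < r1 else 'v') * abs(r2 - r1)
--     if c2 == 0 and r1 == 3:
--         return [v + h]            # leaving the bottom row into the left column: go up first
--     if c1 == 0 and r2 == 3:
--         return [h + v]            # leaving the left column into the bottom row: go right first
--     if h == '' or v == '':
--         return [h + v]
--     return [h + v, v + h]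
--
-- def numeric_to_directional(code):
--     def build(prev, rest):
--         if not rest:
--             return ['']
--         tails = build(rest[0], rest[1:])
--         return [m + 'A' + t for m in _moves(prev, rest[0]) for t in tails]
--     sequences = build('A', code)
--     len_seq = min(len(s) for s in sequences)
--     return [s for s in sequences if len(s) == len_seq]
-- ===== Notes on version B (the rewrite author's own statement) =====
-- stated objective: alternative
-- what changed: B replaces A's column-string index lookup with a direct (row,col) position table, replaces the mutation-based keys-list construction with an explicit case analysis that emits the one or two candidate move strings, and combines the per-key moves by recursion over the code instead of A's rebuild-the-whole-list loop; the final min-length filter is kept.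
import Mathlib
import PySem

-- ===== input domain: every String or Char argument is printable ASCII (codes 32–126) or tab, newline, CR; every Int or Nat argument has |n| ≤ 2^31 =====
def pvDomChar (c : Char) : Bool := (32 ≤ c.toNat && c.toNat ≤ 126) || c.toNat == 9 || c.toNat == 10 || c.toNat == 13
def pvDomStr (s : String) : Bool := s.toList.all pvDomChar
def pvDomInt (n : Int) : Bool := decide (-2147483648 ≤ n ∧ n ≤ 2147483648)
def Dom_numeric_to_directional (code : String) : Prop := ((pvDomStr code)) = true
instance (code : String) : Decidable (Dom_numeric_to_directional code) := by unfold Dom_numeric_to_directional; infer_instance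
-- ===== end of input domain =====

-- B replaces A's string-index column lookup, mutation-based keys list and rebuild-the-list
-- loop by a position table, an explicit case analysis for the move strings, and recursion
-- over the code (alternative decomposition, same cost).

-- ===== PORT A =====

-- row_col_numeric_keypad: falls through (returns None) on a key absent from the keypad → Option
def rowColNum (key : Char) : Option (Nat × Nat) :=
  let col0 := "x147".toList
  let col1 := "0258".toList
  let col2 := "A369".toList
  if key ∈ col0 then (PySem.List.index? col0 key).map (fun i => (i, 0))
  else if key ∈ col1 then (PySem.List.index? col1 key).map (fun i => (i, 1))
  else if key ∈ col2 then (PySem.List.index? col2 key).map (fun i => (i, 2))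
  else none

-- keypad_numeric: none = the TypeError Python raises unpacking None (key not on the keypad)
def keypadNum (cur tgt : Char) : Option (List (List Char)) :=
  match rowColNum cur, rowColNum tgt with
  | some (rc, cc), some (rt, ct) =>
    let k0 : List Char := []
    let k0 := if cc < ct then k0 ++ List.replicate (ct - cc) '>'
              else if cc > ct ∧ ¬(ct = 0 ∧ rc = 0) then k0 ++ List.replicate (cc - ct) '<'
              else k0
    let p : List Char × List Char :=
      if rc < rt then
        (k0 ++ List.replicate (rt - rc) '^',
         if k0 ≠ [] then List.replicate (rt - rc) '^' ++ k0 else [])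
      else if rt < rc then
        (k0 ++ List.replicate (rc - rt) 'v',
         if k0 ≠ [] ∧ ¬(cc = 0 ∧ rt = 0) then List.replicate (rc - rt) 'v' ++ k0 else [])
      else (k0, [])
    let k0 := p.1
    let extra := p.2
    let k0 := if cc > ct ∧ (ct = 0 ∧ rc = 0) then k0 ++ List.replicate (cc - ct) '<' else k0
    some (if extra = [] then [k0] else [k0, extra])
  | _, _ => none
  -- (the Python appends the alternative AFTER mutating keys[0]; the later '<'-suffix case never
  --  coexists with an appended alternative, so keys is [k0] or [k0, extra] exactly as above)

-- the for-loop of numeric_to_directional: state = (prev_key in args, sequences);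
-- none = an exception already occurred
def aLoop : List Char → Char → Option (List (List Char)) → Option (List (List Char))
  | [], _, seqs => seqs
  | k :: cs, prev, seqs =>
    let next : Option (List (List Char)) :=
      match seqs, keypadNum prev k with
      | some sq, some ks =>
        some (sq.foldl (fun acc seq => ks.foldl (fun a2 s => a2 ++ [seq ++ s ++ ['A']]) acc) [])
      | _, _ => none
    aLoop cs k next

-- min length + filter (the tail of A)
def minFilter (seqs : List (List Char)) : List (List Char) :=
  match PySem.List.min? (seqs.map List.length) (fun x => x) with
  | none => []
  | some m => seqs.filter (fun s => s.length = m)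

def numeric_to_directional (code : String) : List String :=
  match aLoop code.toList 'A' (some [[]]) with
  | none => []
  | some seqs => (minFilter seqs).map String.ofList

-- ===== PORT B =====

-- POS: the dict literal as an association list (first-match lookup = Python dict lookup)
def bPOS : List (Char × (Nat × Nat)) :=
  [('7', (0, 0)), ('8', (0, 1)), ('9', (0, 2)),
   ('4', (1, 0)), ('5', (1, 1)), ('6', (1, 2)),
   ('1', (2, 0)), ('2', (2, 1)), ('3', (2, 2)),
   ('x', (3, 0)), ('0', (3, 1)), ('A', (3, 2))]

-- _moves: none = the KeyError Python raises on POS[key] for a key off the keypad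
def bMoves (cur tgt : Char) : Option (List (List Char)) :=
  match PySem.Dict.get? ⟨bPOS⟩ cur, PySem.Dict.get? ⟨bPOS⟩ tgt with
  | some (r1, c1), some (r2, c2) =>
    let h := List.replicate (if c2 > c1 then c2 - c1 else c1 - c2) (if c2 > c1 then '>' else '<')
    let v := List.replicate (if r2 < r1 then r1 - r2 else r2 - r1) (if r2 < r1 then '^' else 'v')
    if c2 = 0 ∧ r1 = 3 then some [v ++ h]
    else if c1 = 0 ∧ r2 = 3 then some [h ++ v]
    else if h = [] ∨ v = [] then some [h ++ v]
    else some [h ++ v, v ++ h]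
  | _, _ => none

-- build(prev, rest): recursion over the code, combining each step's moves with the tails
def bBuild : Char → List Char → Option (List (List Char))
  | _, [] => some [[]]
  | prev, k :: rest =>
    match bMoves prev k, bBuild k rest with
    | some ms, some tails => some (ms.flatMap (fun m => tails.map (fun t => m ++ 'A' :: t)))
    | _, _ => none

-- min length + filter (the tail of B)
def bMinFilter (seqs : List (List Char)) : List (List Char) :=
  match PySem.List.min? (seqs.map List.length) (fun x => x) with
  | none => []
  | some m => seqs.filter (fun s => s.length = m)

def numeric_to_directional_alt (code : String) : List String :=
  match bBuild 'A' code.toList with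
  | none => []
  | some seqs => (bMinFilter seqs).map String.ofList

-- ===== PRECONDITION & SPEC =====
-- Pre_ excludes exactly the codes containing a character not on the numeric keypad, on which
-- the Python A raises a TypeError unpacking row_col_numeric_keypad's None (B a KeyError).
def Pre_numeric_to_directional (code : String) : Prop :=
  code.toList.all (fun c => decide (c ∈ "x1470258A369".toList)) = true
instance (code : String) : Decidable (Pre_numeric_to_directional code) := by
  unfold Pre_numeric_to_directional; infer_instance

def pvWitness_numeric_to_directional : String := "029A"

def Spec_numeric_to_directional (code : String) (out : List String) : Prop :=
  out = numeric_to_directional_alt code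
instance (code : String) (out : List String) : Decidable (Spec_numeric_to_directional code out) := by
  unfold Spec_numeric_to_directional; infer_instance

-- ===== CLAIM =====
def Claim_equal_numeric_to_directional : Prop :=
  ∀ (code : String), Dom_numeric_to_directional code → Pre_numeric_to_directional code →
    Spec_numeric_to_directional code (numeric_to_directional code)

-- ===== LEMMAS AND PROOFS =====

-- the keypad alphabet
def pvKeys : List Char := "x1470258A369".toList

-- on the keypad alphabet the two move helpers agree (144 closed cases)
set_option maxRecDepth 4000 in
theorem moves_eq_bool :
    (pvKeys.all fun p => pvKeys.all fun k => decide (keypadNum p k = bMoves p k)) = true := by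
  decide

theorem moves_eq : ∀ p ∈ pvKeys, ∀ k ∈ pvKeys, keypadNum p k = bMoves p k := by
  intro p hp k hk
  exact of_decide_eq_true (List.all_eq_true.mp (List.all_eq_true.mp moves_eq_bool p hp) k hk)

theorem aLoop_none (cs : List Char) (prev : Char) : aLoop cs prev none = none := by
  induction cs generalizing prev with
  | nil => rfl
  | cons k cs ih => simpa [aLoop] using ih k

theorem flatten_map_singleton {α β : Type} (l : List α) (f : α → β) :
    (l.map (fun x => [f x])).flatten = l.map f := by
  induction l with
  | nil => rfl
  | cons x l ih => simp [ih]

theorem outer_foldl (sq : List (List Char)) (init : List (List Char))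
    (f : List Char → List (List Char)) :
    sq.foldl (fun acc seq => acc ++ f seq) init = init ++ sq.flatMap f := by
  induction sq generalizing init with
  | nil => simp
  | cons seq sq ih => simp [List.foldl_cons, ih]

theorem aLoop_eq_bBuild (cs : List Char) (prev : Char) (sq : List (List Char))
    (hp : prev ∈ pvKeys) (hcs : ∀ c ∈ cs, c ∈ pvKeys) :
    aLoop cs prev (some sq)
      = (bBuild prev cs).map
          (fun tails => sq.flatMap (fun seq => tails.map (fun t => seq ++ t))) := by
  induction cs generalizing prev sq with
  | nil => simp [aLoop, bBuild]
  | cons k cs ih =>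
    have hk : k ∈ pvKeys := hcs k (by simp)
    have hmv := moves_eq prev hp k hk
    cases hks : bMoves prev k with
    | none => simp [aLoop, hmv, hks, bBuild, aLoop_none]
    | some ks =>
      have hfold : (sq.foldl (fun acc seq => ks.foldl (fun a2 s => a2 ++ [seq ++ s ++ ['A']]) acc) [])
          = sq.flatMap (fun seq => ks.map (fun s => seq ++ s ++ ['A'])) := by
        calc sq.foldl (fun acc seq => ks.foldl (fun a2 s => a2 ++ [seq ++ s ++ ['A']]) acc) []
            = sq.foldl (fun acc seq => acc ++ ks.map (fun s => seq ++ s ++ ['A'])) [] := by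
              simp [flatten_map_singleton]
          _ = sq.flatMap (fun seq => ks.map (fun s => seq ++ s ++ ['A'])) := by
              simpa using outer_foldl sq [] _
      simp only [aLoop, hmv, hks, hfold, bBuild]
      rw [ih k _ hk (fun c hc => hcs c (by simp [hc]))]
      cases bBuild k cs with
      | none => simp
      | some tails =>
        simp [List.flatMap_map, List.map_flatMap, List.map_map,
              Function.comp_def, List.flatMap_assoc, List.append_assoc]

-- ===== VERDICT =====
theorem numeric_to_directional_spec : Claim_equal_numeric_to_directional := by
  unfold Claim_equal_numeric_to_directional
  intro code _ hpre
  unfold Spec_numeric_to_directional numeric_to_directional numeric_to_directional_alt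
  have hcs : ∀ c ∈ code.toList, c ∈ pvKeys := by
    intro c hc
    have := List.all_eq_true.mp hpre c hc
    simpa [pvKeys] using of_decide_eq_true this
  rw [aLoop_eq_bBuild code.toList 'A' [[]] (by decide) hcs]
  cases bBuild 'A' code.toList with
  | none => rfl
  | some tails => simp [minFilter, bMinFilter]
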